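-- pv_equiv track=rewrite | github.com/hugopuybareau/POKER-AI-PROJECT | Classes/combinations_utils.py | flushValue
-- ===== SOURCE A (Python) =====
-- def flushValue(f_counts) :
--     for count in f_counts :
--         if sum(count) >= 5 :
--             s, nb = 0, 0
--             index = len(count)-1
--             while index >= 0 and nb < 5 :
--                 if count[index] > 0 :
--                     nb += 1
--                 s += 2**index
--                 index -= 1
--             return s #Valeur pour flush à shifter
-- ===== SOURCE B (Python) =====
-- def flushValue(f_counts):
--     flush = next((c for c in f_counts if sum(c) >= 5), None)
--     if flush is None:
--         return None
--     pos = [i for i in range(len(flush)) if flush[i] > 0]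
--     j = pos[-5] if len(pos) >= 5 else 0
--     return (1 << len(flush)) - (1 << j)
-- ===== Notes on version B (the rewrite author's own statement) =====
-- stated objective: simpler
-- what changed: B selects the flushing suit with a single next()/find, builds the list of positive-rank indices once, and returns the closed-form contiguous mask (1 << len) - (1 << j) at j = index of the 5th-highest positive rank (0 if fewer), instead of A's while loop accumulating 2**index bit by bit while counting nonzero ranks.
import Mathlib
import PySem

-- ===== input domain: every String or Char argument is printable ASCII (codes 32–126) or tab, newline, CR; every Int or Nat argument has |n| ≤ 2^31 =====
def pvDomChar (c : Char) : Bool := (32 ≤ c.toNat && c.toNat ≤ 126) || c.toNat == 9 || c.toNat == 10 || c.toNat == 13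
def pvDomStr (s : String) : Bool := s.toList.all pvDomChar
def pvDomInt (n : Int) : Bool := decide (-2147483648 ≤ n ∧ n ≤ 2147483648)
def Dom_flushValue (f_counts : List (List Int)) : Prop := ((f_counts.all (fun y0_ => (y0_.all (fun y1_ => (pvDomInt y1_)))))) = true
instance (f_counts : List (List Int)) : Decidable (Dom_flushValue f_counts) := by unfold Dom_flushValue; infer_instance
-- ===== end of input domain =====

-- B: find the flushing suit, list its positive-rank indices once, and return the closed-form mask (1 << len) - (1 << j) at the 5th-highest positive index (objective: simpler).
-- ===== PORT A =====
-- while index >= 0 and nb < 5: fuel = index+1 (index stays in range, so plain getD reads count[index])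
def flushValueLoopA (count : List Int) : Nat → Int → Int → Int
  | 0, s, _ => s
  | i+1, s, nb =>
    if nb < 5 then
      let nb' : Int := if count.getD i 0 > 0 then nb + 1 else nb
      flushValueLoopA count i (s + 2 ^ i) nb'
    else s

def flushValue (f_counts : List (List Int)) : Option Int :=
  match f_counts with
  | [] => none
  | count :: rest =>
    if count.sum ≥ 5 then some (flushValueLoopA count count.length 0 0)
    else flushValue rest

-- ===== PORT B =====
-- next((c for c in f_counts if sum(c) >= 5), None) → List.find?; flush[i] is read with i drawn
-- from range(len(flush)), so in-range getD is exact; pos[-5] = pos[len-5] since len(pos) ≥ 5.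
def flushValue_alt (f_counts : List (List Int)) : Option Int :=
  match f_counts.find? (fun c => decide (c.sum ≥ 5)) with
  | none => none
  | some flush =>
    let pos : List Nat := (List.range flush.length).filter (fun i => decide (0 < flush.getD i 0))
    let j : Nat := if pos.length ≥ 5 then pos.getD (pos.length - 5) 0 else 0
    some ((2 ^ flush.length : Int) - 2 ^ j)

-- ===== PRECONDITION & SPEC =====
def Spec_flushValue (f_counts : List (List Int)) (out : Option Int) : Prop := out = flushValue_alt f_counts
instance (f_counts : List (List Int)) (out : Option Int) : Decidable (Spec_flushValue f_counts out) := by unfold Spec_flushValue; infer_instance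

-- ===== CLAIM (what is proved, stated in full; the proofs are below) =====
def Claim_equal_flushValue : Prop := ∀ (f_counts : List (List Int)), Dom_flushValue f_counts → Spec_flushValue f_counts (flushValue f_counts)

-- ===== LEMMAS AND PROOFS =====
-- proof-side helper: the index A's loop stops at (5th positive entry scanning down, else 0)
def flushLoopJ (count : List Int) : Nat → Int → Nat
  | 0, _ => 0
  | i+1, nb =>
    if count.getD i 0 > 0 then
      if nb + 1 = 5 then i else flushLoopJ count i (nb + 1)
    else flushLoopJ count i nb

-- positive indices among the first f ranks, in increasing order
def posUpto (count : List Int) (f : Nat) : List Nat :=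
  (List.range f).filter (fun i => decide (0 < count.getD i 0))

theorem loopA_stop (count : List Int) (f : Nat) (s nb : Int) (h : ¬ nb < 5) :
    flushValueLoopA count f s nb = s := by
  cases f <;> simp [flushValueLoopA, h]

theorem loopA_eq (count : List Int) (f : Nat) (s nb : Int) (h : nb < 5) :
    flushValueLoopA count f s nb = s + 2 ^ f - 2 ^ (flushLoopJ count f nb) := by
  induction f generalizing s nb with
  | zero => simp [flushValueLoopA, flushLoopJ]
  | succ i ih =>
    simp only [flushValueLoopA, flushLoopJ, h, if_pos]
    by_cases hc : count.getD i 0 > 0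
    · simp only [hc, if_pos]
      by_cases h5 : nb + 1 = 5
      · simp only [h5, if_pos, loopA_stop count i _ _ (by omega : ¬ (5:Int) < 5)]
        ring
      · have hlt : nb + 1 < 5 := by omega
        simp only [h5, ite_false]
        rw [ih _ _ hlt]
        ring
    · simp only [hc, ite_false]
      rw [ih _ _ h]
      ring

theorem posUpto_succ (count : List Int) (f : Nat) :
    posUpto count (f+1) =
      posUpto count f ++ (if count.getD f 0 > 0 then [f] else []) := by
  simp only [posUpto, List.range_succ, List.filter_append]
  split_ifs with h <;> simp only [List.getD] at h <;> simp [h]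

theorem loopJ_eq (count : List Int) (f : Nat) (nb : Int) (h0 : 0 ≤ nb) (h : nb < 5) :
    flushLoopJ count f nb =
      if (5 - nb).toNat ≤ (posUpto count f).length then
        (posUpto count f).getD ((posUpto count f).length - (5 - nb).toNat) 0
      else 0 := by
  induction f generalizing nb with
  | zero =>
    have : ¬ (5 - nb).toNat ≤ (posUpto count 0).length := by
      simp [posUpto]; omega
    simp [flushLoopJ, this]
  | succ i ih =>
    rw [posUpto_succ]
    simp only [flushLoopJ]
    by_cases hc : count.getD i 0 > 0
    · simp only [hc, if_pos]
      by_cases h5 : nb + 1 = 5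
      · have hk : (5 - nb).toNat = 1 := by omega
        simp only [h5, if_pos, hk, List.length_append, List.length_singleton]
        have hle : 1 ≤ (posUpto count i).length + 1 := by omega
        rw [if_pos hle]
        have : (posUpto count i).length + 1 - 1 = (posUpto count i).length := by omega
        rw [this, List.getD_eq_getElem?_getD, List.getElem?_append_right (by omega)]
        simp
      · have hlt : nb + 1 < 5 := by omega
        simp only [h5, ite_false]
        rw [ih (nb+1) (by omega) hlt]
        have hk : (5 - (nb+1)).toNat = (5 - nb).toNat - 1 := by omega
        have hk1 : 1 ≤ (5 - nb).toNat := by omega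
        have hk2 : 2 ≤ (5 - nb).toNat := by omega
        rw [hk]
        simp only [List.length_append, List.length_singleton]
        by_cases hL : (5 - nb).toNat - 1 ≤ (posUpto count i).length
        · rw [if_pos hL, if_pos (by omega)]
          have hidx : (posUpto count i).length + 1 - (5 - nb).toNat
              = (posUpto count i).length - ((5 - nb).toNat - 1) := by omega
          have hbound : (posUpto count i).length - ((5 - nb).toNat - 1)
              < (posUpto count i).length := by omega
          rw [hidx, List.getD_eq_getElem?_getD, List.getD_eq_getElem?_getD,
            List.getElem?_append_left hbound]
        · rw [if_neg hL, if_neg (by omega)]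
    · simp only [hc, ite_false, List.append_nil]
      exact ih nb h0 h

theorem flushValue_eq_alt (f_counts : List (List Int)) :
    flushValue f_counts = flushValue_alt f_counts := by
  induction f_counts with
  | nil => rfl
  | cons count rest ih =>
    by_cases h : count.sum ≥ 5
    · simp only [flushValue, flushValue_alt, List.find?_cons, h, if_pos, decide_true]
      rw [loopA_eq count count.length 0 0 (by omega)]
      rw [loopJ_eq count count.length 0 (by omega) (by omega)]
      have h5 : ((5:Int) - 0).toNat = 5 := rfl
      rw [h5]
      simp only [posUpto, zero_add, ge_iff_le]
    · simp only [flushValue, flushValue_alt, List.find?_cons, h, decide_false, ite_false]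
      rw [ih]
      rfl

-- ===== VERDICT (by name: the statement is the Claim_ definition above) =====
theorem flushValue_spec : Claim_equal_flushValue := by
  intro f_counts _
  unfold Spec_flushValue
  exact flushValue_eq_alt f_counts
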